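-- pv_equiv track=rewrite | github.com/alexbaryzhikov/codebase-archive | Python/reusable/partitions.py | bit_combinations
-- ===== SOURCE A (Python) =====
-- def bit_combinations(n, k):
--     '''Yields bit-coded k-combinations of n elements'''
--     assert 0 <= k <= n   # range of combination size
--     if k == 0:
--         yield 0
--     elif k == 1:
--         for i in range(n):
--             yield 1<<i
--     else:
--         for i in range(n-k+1):
--             for j in bit_combinations(n-i-1, k-1):
--                 yield (1<<i)+(j<<i+1)
-- ===== SOURCE B (Python) =====
-- from itertools import combinations
--
--
-- def bit_combinations(n, k):
--     '''Yields bit-coded k-combinations of n elements'''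
--     assert 0 <= k <= n   # range of combination size
--     for combo in combinations(range(n), k):
--         yield sum(1 << i for i in combo)
-- ===== Notes on version B (the rewrite author's own statement) =====
-- stated objective: idiomatic
-- what changed: Replaces the hand-rolled three-branch recursion (with per-prefix bit shifting) by a single loop over itertools.combinations(range(n), k), encoding each combination as a bitmask sum; the recursion's custom order is exactly the lexicographic order combinations yields.
import Mathlib
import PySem

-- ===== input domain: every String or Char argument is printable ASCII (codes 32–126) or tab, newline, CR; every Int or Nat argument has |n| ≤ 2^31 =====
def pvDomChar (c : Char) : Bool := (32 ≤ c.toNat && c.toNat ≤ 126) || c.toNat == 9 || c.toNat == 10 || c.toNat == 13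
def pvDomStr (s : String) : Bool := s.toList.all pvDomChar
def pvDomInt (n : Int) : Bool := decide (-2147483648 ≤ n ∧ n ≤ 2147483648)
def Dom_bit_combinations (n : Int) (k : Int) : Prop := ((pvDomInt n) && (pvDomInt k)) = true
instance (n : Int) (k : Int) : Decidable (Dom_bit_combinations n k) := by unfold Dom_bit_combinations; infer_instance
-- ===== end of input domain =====

-- B replaces A's three-branch recursion by one loop over itertools.combinations, encoding each
-- k-combination of range(n) as a bitmask (idiomatic; same order, proved equal on 0 ≤ k ≤ n).
-- Both Pythons are generators; equivalence is about the list of yielded values.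

-- ===== PORT A =====
-- 'assert 0 <= k <= n' raises AssertionError when false: those inputs are outside Pre_;
-- the port returns [] there.  '1<<i' is 2^i, '(1<<i)+(j<<i+1)' is 2^i + j*2^(i+1).
def bit_combinations (n : Int) (k : Int) : List Int :=
  if 0 ≤ k ∧ k ≤ n then
    if k = 0 then [0]
    else if k = 1 then (PySem.List.pyRange 0 n 1).map (fun i => 2 ^ i.toNat)
    else (PySem.List.pyRange 0 (n - k + 1) 1).flatMap (fun i =>
      (bit_combinations (n - i - 1) (k - 1)).map
        (fun j => 2 ^ i.toNat + j * 2 ^ (i + 1).toNat))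
  else []
termination_by k.toNat
decreasing_by omega

-- ===== PORT B =====
-- hand port of itertools.combinations(l, k) (lexicographic order of position subsets)
def pvCombos (k : Nat) (l : List Int) : List (List Int) :=
  match k, l with
  | 0, _ => [[]]
  | _ + 1, [] => []
  | k + 1, x :: xs => (pvCombos k xs).map (fun c => x :: c) ++ pvCombos (k + 1) xs

-- sum(1 << i for i in combo)
def pvEncode (c : List Int) : Int := c.foldl (fun s i => s + 2 ^ i.toNat) 0

def bit_combinations_alt (n : Int) (k : Int) : List Int :=
  if 0 ≤ k ∧ k ≤ n then (pvCombos k.toNat (PySem.List.pyRange 0 n 1)).map pvEncode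
  else []

-- ===== PRECONDITION & SPEC =====
-- Pre_: exactly the inputs on which A's assert passes (otherwise both Pythons raise AssertionError).
def Pre_bit_combinations (n : Int) (k : Int) : Prop := 0 ≤ k ∧ k ≤ n
instance (n : Int) (k : Int) : Decidable (Pre_bit_combinations n k) := by unfold Pre_bit_combinations; infer_instance
def pvWitness_bit_combinations : Int × Int := (5, 2)

def Spec_bit_combinations (n : Int) (k : Int) (out : List Int) : Prop := out = bit_combinations_alt n k
instance (n : Int) (k : Int) (out : List Int) : Decidable (Spec_bit_combinations n k out) := by unfold Spec_bit_combinations; infer_instance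

-- ===== CLAIM (what is proved, stated in full; the proofs are below) =====
def Claim_equal_bit_combinations : Prop := ∀ (n : Int) (k : Int), Dom_bit_combinations n k → Pre_bit_combinations n k → Spec_bit_combinations n k (bit_combinations n k)

-- ===== LEMMAS AND PROOFS =====

-- [0, 1, ..., m-1] as integers
def rngN (m : Nat) : List Int := (List.range m).map Int.ofNat

lemma pyRange_eq_rngN (m : Nat) : PySem.List.pyRange 0 (m : Int) 1 = rngN m := by
  rw [PySem.List.pyRange_one]
  simp [rngN, Int.ofNat_eq_natCast]

lemma rngN_succ (m : Nat) : rngN (m + 1) = 0 :: (rngN m).map (· + 1) := by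
  simp [rngN, List.range_succ_eq_map, List.map_map, Function.comp_def]

lemma pvCombos_map (k : Nat) (l : List Int) (f : Int → Int) :
    pvCombos k (l.map f) = (pvCombos k l).map (List.map f) := by
  induction l generalizing k with
  | nil => cases k <;> simp [pvCombos]
  | cons x xs ih =>
    cases k with
    | zero => simp [pvCombos]
    | succ k => simp [pvCombos, ih, List.map_map, Function.comp_def]

lemma mem_pvCombos (k : Nat) (l : List Int) (c : List Int) (hc : c ∈ pvCombos k l) :
    ∀ x ∈ c, x ∈ l := by
  induction l generalizing k c with
  | nil => cases k <;> simp_all [pvCombos]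
  | cons y xs ih =>
    cases k with
    | zero => simp [pvCombos] at hc; simp [hc]
    | succ k =>
      simp only [pvCombos, List.mem_append, List.mem_map] at hc
      rcases hc with ⟨c', hc', rfl⟩ | hc
      · intro x hx
        rcases List.mem_cons.mp hx with rfl | hx
        · exact List.mem_cons_self
        · exact List.mem_cons_of_mem _ (ih k c' hc' x hx)
      · exact fun x hx => List.mem_cons_of_mem _ (ih (k + 1) c hc x hx)

lemma foldl_add_pow (c : List Int) (a : Int) :
    c.foldl (fun s i => s + 2 ^ i.toNat) a = a + (c.map (fun i : Int => (2 : Int) ^ i.toNat)).sum := by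
  induction c generalizing a with
  | nil => simp
  | cons x xs ih => simp [ih, add_assoc]

lemma pvEncode_cons (x : Int) (c : List Int) : pvEncode (x :: c) = 2 ^ x.toNat + pvEncode c := by
  simp [pvEncode, foldl_add_pow]

lemma pvEncode_map_succ (c : List Int) (h : ∀ x ∈ c, 0 ≤ x) :
    pvEncode (c.map (· + 1)) = 2 * pvEncode c := by
  rw [pvEncode, pvEncode, foldl_add_pow, foldl_add_pow, zero_add, zero_add, List.map_map,
    ← List.sum_map_mul_left]
  refine congrArg List.sum (List.map_congr_left fun x hx => ?_)
  have hx0 := h x hx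
  have ht : ((x + 1).toNat) = x.toNat + 1 := by omega
  simp only [Function.comp_def, ht, pow_succ]
  ring

-- B's value at natural-number arguments
def EN (n k : Nat) : List Int := (pvCombos k (rngN n)).map pvEncode

lemma EN_zero (n : Nat) : EN n 0 = [0] := by simp [EN, pvCombos, pvEncode]

lemma EN_nil (k : Nat) : EN 0 (k + 1) = [] := by simp [EN, rngN, pvCombos]

lemma rngN_nonneg (m : Nat) : ∀ x ∈ rngN m, 0 ≤ x := by
  intro x hx; simp [rngN] at hx; omega

lemma EN_succ (n k : Nat) :
    EN (n + 1) (k + 1) = (EN n k).map (fun m => 1 + 2 * m) ++ (EN n (k + 1)).map (fun m => 2 * m) := by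
  simp only [EN, rngN_succ, pvCombos, pvCombos_map, List.map_append, List.map_map, Function.comp_def]
  congr 1
  · refine List.map_congr_left fun c hc => ?_
    have h1 : ∀ x ∈ c, 0 ≤ x := fun x hx => rngN_nonneg n x (mem_pvCombos _ _ _ hc x hx)
    rw [pvEncode_cons, pvEncode_map_succ c h1]
    norm_num
  · refine List.map_congr_left fun c hc => ?_
    exact pvEncode_map_succ c (fun x hx => rngN_nonneg n x (mem_pvCombos _ _ _ hc x hx))

-- A at natural-number arguments
def AN (n k : Nat) : List Int := bit_combinations (n : Int) (k : Int)

lemma AN_zero (n : Nat) : AN n 0 = [0] := by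
  unfold AN; rw [bit_combinations]; simp

lemma AN_of_gt (n k : Nat) (h : n < k) : AN n k = [] := by
  unfold AN; rw [bit_combinations]
  rw [if_neg]; omega

lemma AN_one (n : Nat) : AN n 1 = (rngN n).map (fun i => 2 ^ i.toNat) := by
  unfold AN
  rcases Nat.eq_zero_or_pos n with rfl | hn
  · rw [bit_combinations]; simp [rngN]
  · rw [bit_combinations]
    simp only [Nat.cast_one]
    rw [if_pos (by omega), if_neg (by omega), if_pos trivial, pyRange_eq_rngN]

-- the k ≥ 2 branch of A, rewritten over rngN
lemma AN_big (n k : Nat) (h2 : 2 ≤ k) (hkn : k ≤ n) :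
    AN n k = (rngN (n - k + 1)).flatMap (fun i =>
      (bit_combinations ((n : Int) - i - 1) ((k : Int) - 1)).map
        (fun j => 2 ^ i.toNat + j * 2 ^ (i + 1).toNat)) := by
  unfold AN
  rw [bit_combinations]
  rw [if_pos (by omega), if_neg (by omega), if_neg (by omega)]
  have : (n : Int) - k + 1 = ((n - k + 1 : Nat) : Int) := by omega
  rw [this, pyRange_eq_rngN]

lemma AN_cast (n k : Nat) : bit_combinations (n : Int) (k : Int) = AN n k := rfl

lemma flatMap_rngN (m : Nat) (f : Int → List Int) :
    (rngN m).flatMap f = (List.range m).flatMap (fun i : Nat => f (i : Int)) := by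
  simp [rngN, List.flatMap_map]

-- AN_big with all index arithmetic moved to Nat
lemma AN_big' (n k : Nat) (h2 : 2 ≤ k) (hkn : k ≤ n) :
    AN n k = (List.range (n - k + 1)).flatMap (fun i =>
      (AN (n - i - 1) (k - 1)).map (fun j => 2 ^ i + j * 2 ^ (i + 1))) := by
  rw [AN_big n k h2 hkn, flatMap_rngN]
  refine List.flatMap_congr fun i hi => ?_
  have hi' : i < n - k + 1 := List.mem_range.mp hi
  have e1 : (n : Int) - (i : Int) - 1 = ((n - i - 1 : Nat) : Int) := by omega
  have e2 : (k : Int) - 1 = ((k - 1 : Nat) : Int) := by omega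
  have e3 : ((i : Int)).toNat = i := Int.toNat_natCast i
  have e4 : ((i : Int) + 1).toNat = i + 1 := by omega
  rw [e1, e2, AN_cast, e3, e4]

-- the key recurrence satisfied by A (mirrors EN_succ), unconditionally
lemma AN_succ (n k : Nat) :
    AN (n + 1) (k + 1) = (AN n k).map (fun m => 1 + 2 * m) ++ (AN n (k + 1)).map (fun m => 2 * m) := by
  cases k with
  | zero =>
    rw [AN_one, AN_one, AN_zero, rngN_succ]
    simp only [List.map_cons, List.map_map, Function.comp_def, List.map_nil,
      List.singleton_append, Int.toNat_zero, pow_zero, mul_zero]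
    congr 1
    refine List.map_congr_left fun x hx => ?_
    have hx0 := rngN_nonneg n x hx
    have ht : (x + 1).toNat = x.toNat + 1 := by omega
    rw [ht, pow_succ]; ring
  | succ k' =>
    by_cases hkn : k' + 1 ≤ n
    · rw [AN_big' (n + 1) (k' + 2) (by omega) (by omega)]
      have hm : n + 1 - (k' + 2) + 1 = (n - (k' + 1)) + 1 := by omega
      rw [hm, List.range_succ_eq_map, List.flatMap_cons, List.flatMap_map]
      congr 1
      · simp only [Nat.sub_zero, Nat.add_sub_cancel, pow_zero]
        refine List.map_congr_left fun j _ => by ring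
      · by_cases hk2 : k' + 2 ≤ n
        · have hr : n - (k' + 2) + 1 = n - (k' + 1) := by omega
          rw [AN_big' n (k' + 2) (by omega) hk2, hr, List.map_flatMap]
          refine List.flatMap_congr fun i hi => ?_
          simp only [Function.comp_def, List.map_map, Nat.succ_eq_add_one]
          have e : n + 1 - (i + 1) - 1 = n - i - 1 := by omega
          rw [e]
          refine List.map_congr_left fun j _ => ?_
          simp only [pow_succ]
          ring
        · have hn : k' + 1 = n := by omega
          rw [AN_of_gt n (k' + 2) (by omega)]
          simp [hn]
    · rw [AN_of_gt (n + 1) (k' + 2) (by omega), AN_of_gt n (k' + 1) (by omega),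
        AN_of_gt n (k' + 2) (by omega)]
      simp

lemma AN_eq_EN (n k : Nat) : AN n k = EN n k := by
  induction n generalizing k with
  | zero =>
    cases k with
    | zero => rw [AN_zero, EN_zero]
    | succ k => rw [AN_of_gt 0 (k + 1) (by omega), EN_nil]
  | succ n ih =>
    cases k with
    | zero => rw [AN_zero, EN_zero]
    | succ k => rw [AN_succ, EN_succ, ih k, ih (k + 1)]

-- ===== VERDICT (by name: the statement is the Claim_ definition above) =====
theorem bit_combinations_spec : Claim_equal_bit_combinations := by
  intro n k _ hpre
  obtain ⟨hk, hkn⟩ := hpre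
  unfold Spec_bit_combinations bit_combinations_alt
  rw [if_pos ⟨hk, hkn⟩]
  have hn : (0 : Int) ≤ n := le_trans hk hkn
  have hne : n = ((n.toNat : Nat) : Int) := by omega
  have hke : k = ((k.toNat : Nat) : Int) := by omega
  rw [hne, hke, AN_cast, AN_eq_EN, EN]
  rw [pyRange_eq_rngN, Int.toNat_natCast]
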